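-- pv_equiv track=rewrite | github.com/josephcslater/josephcslater.github.io | pelican/plugins/neighbors/neighbors.py | iter3
-- ===== SOURCE A (Python) =====
-- def iter3(seq):
--     """Generate one triplet per element in 'seq' following PEP-479."""
--     nxt, cur = None, None
--     for prv in seq:
--         if cur:
--             yield nxt, cur, prv
--         nxt, cur = cur, prv
--     # Don't yield anything if empty seq
--     if cur:
--         # Yield last element in seq (also if len(seq) == 1)
--         yield nxt, cur, None
-- ===== SOURCE B (Python) =====
-- def iter3(seq):
--     """Generate one triplet per element in 'seq' following PEP-479."""
--     lst = list(seq)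
--     n = len(lst)
--     for i in range(n):
--         cur = lst[i]
--         if cur:
--             prev = lst[i - 1] if i > 0 else None
--             nxt = lst[i + 1] if i + 1 < n else None
--             yield prev, cur, nxt
-- ===== Notes on version B (the rewrite author's own statement) =====
-- stated objective: alternative
-- what changed: B materializes the sequence and does one indexed pass reading neighbors by random access, instead of A's shift-register state machine carrying (nxt, cur) across iterations with a post-loop flush.
import Mathlib
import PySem

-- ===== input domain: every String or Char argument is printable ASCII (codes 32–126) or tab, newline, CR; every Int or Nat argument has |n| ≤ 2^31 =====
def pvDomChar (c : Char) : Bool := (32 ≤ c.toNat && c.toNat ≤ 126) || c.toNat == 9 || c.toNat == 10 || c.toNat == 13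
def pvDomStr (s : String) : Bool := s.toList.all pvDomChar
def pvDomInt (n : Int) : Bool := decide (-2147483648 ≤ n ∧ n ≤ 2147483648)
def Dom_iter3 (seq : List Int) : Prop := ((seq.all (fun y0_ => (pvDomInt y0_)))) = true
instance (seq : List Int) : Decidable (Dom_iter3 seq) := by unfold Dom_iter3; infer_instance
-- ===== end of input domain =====

-- B replaces A's shift-register state machine (nxt, cur carried across the loop plus a
-- post-loop flush) by one indexed pass over a materialized list, reading neighbors by
-- random access; same values, alternative decomposition (no speed claim).


-- ===== PORT A =====
-- A's loop carries (nxt, cur); each step yields (nxt, cur, prv) when cur is truthy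
-- (cur = some v with v ≠ 0); after the loop it flushes (nxt, cur, None) if cur truthy.
def iter3Loop (nxt cur : Option Int) : List Int → List (Option Int × Int × Option Int)
  | [] =>
      match cur with
      | some v => if v ≠ 0 then [(nxt, v, none)] else []
      | none => []
  | prv :: rest =>
      (match cur with
       | some v => if v ≠ 0 then [(nxt, v, some prv)] else []
       | none => []) ++ iter3Loop cur (some prv) rest

def iter3 (seq : List Int) : List (Option Int × Int × Option Int) :=
  iter3Loop none none seq

-- ===== PORT B =====
-- B: one indexed pass; for each i with lst[i] truthy, emit (lst[i-1]?, lst[i], lst[i+1]?).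
def iter3_alt (seq : List Int) : List (Option Int × Int × Option Int) :=
  (List.range seq.length).foldl
    (fun acc i =>
      let cur := seq.getD i 0
      if cur ≠ 0 then
        acc ++ [((if 0 < i then some (seq.getD (i - 1) 0) else none), cur,
                 (if i + 1 < seq.length then some (seq.getD (i + 1) 0) else none))]
      else acc) []

-- ===== PRECONDITION & SPEC =====
def Spec_iter3 (seq : List Int) (out : List (Option Int × Int × Option Int)) : Prop := out = iter3_alt seq
instance (seq : List Int) (out : List (Option Int × Int × Option Int)) : Decidable (Spec_iter3 seq out) := by unfold Spec_iter3; infer_instance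

-- ===== CLAIM (what is proved, stated in full; the proofs are below) =====
def Claim_equal_iter3 : Prop := ∀ (seq : List Int), Dom_iter3 seq → Spec_iter3 seq (iter3 seq)

-- ===== LEMMAS AND PROOFS =====

-- common characterization: triples p xs, where p is the element just before xs (if any)
def triples (p : Option Int) : List Int → List (Option Int × Int × Option Int)
  | [] => []
  | x :: xs => (if x ≠ 0 then [(p, x, xs.head?)] else []) ++ triples (some x) xs

theorem iter3Loop_eq_triples (rest : List Int) :
    ∀ (nxt : Option Int) (v : Int),
      iter3Loop nxt (some v) rest
        = (if v ≠ 0 then [(nxt, v, rest.head?)] else []) ++ triples (some v) rest := by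
  induction rest with
  | nil => intro nxt v; simp [iter3Loop, triples]
  | cons p r ih =>
      intro nxt v
      simp [iter3Loop, triples, ih]

theorem iter3_eq_triples (seq : List Int) : iter3 seq = triples none seq := by
  cases seq with
  | nil => rfl
  | cons x xs =>
      show iter3Loop none none (x :: xs) = _
      simp [iter3Loop, triples, iter3Loop_eq_triples]

theorem foldl_guard {α β : Type} (c : α → Prop) [DecidablePred c] (g : α → List β) :
    ∀ (l : List α) (init : List β),
      l.foldl (fun acc a => if c a then acc ++ g a else acc) init
        = init ++ l.flatMap (fun a => if c a then g a else []) := by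
  intro l
  induction l with
  | nil => intro init; simp
  | cons a t ih =>
      intro init
      by_cases h : c a <;> simp [List.foldl_cons, h, ih, List.append_assoc]

theorem flatMap_congr_mem {α β : Type} {l : List α} {f g : α → List β}
    (h : ∀ a ∈ l, f a = g a) : l.flatMap f = l.flatMap g := by
  induction l with
  | nil => rfl
  | cons a t ih =>
      simp only [List.flatMap_cons, h a (List.mem_cons_self), ih (fun b hb => h b (List.mem_cons_of_mem _ hb))]

-- B's body at index i, for list xs with virtual predecessor p at index -1
def idxBody (p : Option Int) (xs : List Int) (i : Nat) : List (Option Int × Int × Option Int) :=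
  if xs.getD i 0 ≠ 0 then
    [((if 0 < i then some (xs.getD (i - 1) 0) else p), xs.getD i 0,
      (if i + 1 < xs.length then some (xs.getD (i + 1) 0) else none))]
  else []

theorem flatMap_idxBody (xs : List Int) :
    ∀ (p : Option Int),
      (List.range xs.length).flatMap (idxBody p xs) = triples p xs := by
  induction xs with
  | nil => intro p; simp [triples]
  | cons x t ih =>
      intro p
      have hrange : List.range (x :: t).length = 0 :: (List.range t.length).map (· + 1) := by
        simp [List.length_cons, List.range_succ_eq_map]
      rw [hrange]
      simp only [List.flatMap_cons, List.flatMap_map]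
      have hshift : ∀ i ∈ List.range t.length,
          idxBody p (x :: t) (i + 1) = idxBody (some x) t i := by
        intro i hi
        simp only [List.mem_range] at hi
        unfold idxBody
        cases i with
        | zero => simp [List.getD]; rfl
        | succ j => simp [List.length_cons]
      have h0 : idxBody p (x :: t) 0 = (if x ≠ 0 then [(p, x, t.head?)] else []) := by
        unfold idxBody
        cases t with
        | nil => simp
        | cons y r => simp
      calc idxBody p (x :: t) 0 ++ (List.range t.length).flatMap (fun i => idxBody p (x :: t) (i + 1))
          = idxBody p (x :: t) 0 ++ (List.range t.length).flatMap (idxBody (some x) t) := by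
            rw [flatMap_congr_mem hshift]
        _ = (if x ≠ 0 then [(p, x, t.head?)] else []) ++ triples (some x) t := by rw [h0, ih]
        _ = triples p (x :: t) := by simp [triples]

theorem iter3_alt_eq_triples (seq : List Int) : iter3_alt seq = triples none seq := by
  show (List.range seq.length).foldl
      (fun acc i =>
        if seq.getD i 0 ≠ 0 then
          acc ++ [((if 0 < i then some (seq.getD (i - 1) 0) else none), seq.getD i 0,
                   (if i + 1 < seq.length then some (seq.getD (i + 1) 0) else none))]
        else acc) [] = triples none seq
  rw [foldl_guard (c := fun i => seq.getD i 0 ≠ 0) (g := fun i =>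
        [((if 0 < i then some (seq.getD (i - 1) 0) else none), seq.getD i 0,
          (if i + 1 < seq.length then some (seq.getD (i + 1) 0) else none))])]
  have hf : (fun a => if seq.getD a 0 ≠ 0 then
        [((if 0 < a then some (seq.getD (a - 1) 0) else none), seq.getD a 0,
          (if a + 1 < seq.length then some (seq.getD (a + 1) 0) else none))] else [])
      = idxBody none seq := by
    funext a; rfl
  rw [hf, flatMap_idxBody]; rfl

-- ===== VERDICT (by name: the statement is the Claim_ definition above) =====
theorem iter3_spec : Claim_equal_iter3 := by
  intro seq _
  show iter3 seq = iter3_alt seq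
  rw [iter3_eq_triples, iter3_alt_eq_triples]
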